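-- pv_equiv track=rewrite | github.com/ctonnesen/comp321-Programming_challenges | Assignments/Assignment3/PebbleSolitaire.py | solitaire
-- ===== SOURCE A (Python) =====
-- def solitaire(line):
--     final_count = 0
--     for char in line:
--         if char == 'o':
--             final_count += 1
--     for i in range(len(line)):
--         if i < len(line) - 2:
--             if line[i] == "o" and line[i + 1] == "o" and line[i + 2] == "-":
--                 alter = line[:i] + "--o" + line[i + 3:]
--                 return_value = solitaire(alter)
--                 if return_value < final_count:
--                     final_count = return_value
--         if 1 < i:
--             if line[i] == "o" and line[i - 1] == "o" and line[i - 2] == "-":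
--                 alter = line[:i - 2] + "o--" + line[i + 1:]
--                 return_value = solitaire(alter)
--                 if return_value < final_count:
--                     final_count = return_value
--     return final_count
-- ===== SOURCE B (Python) =====
-- def solitaire(line):
--     memo = {}
--
--     def best(s):
--         if s in memo:
--             return memo[s]
--         res = s.count('o')
--         for i in range(len(s) - 2):
--             w = s[i:i + 3]
--             if w == 'oo-':
--                 res = min(res, best(s[:i] + '--o' + s[i + 3:]))
--             elif w == '-oo':
--                 res = min(res, best(s[:i] + 'o--' + s[i + 3:]))
--         memo[s] = res
--         return res
--
--     return best(line)
-- ===== Notes on version B (the rewrite author's own statement) =====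
-- stated objective: alternative
-- what changed: Replaces A's plain recursion (which re-solves the same board many times) by memoized recursion on the board string — a DP over reachable states that also scans each state's 3-char windows once with a single window comparison instead of A's two indexed branch tests.
import Mathlib
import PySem

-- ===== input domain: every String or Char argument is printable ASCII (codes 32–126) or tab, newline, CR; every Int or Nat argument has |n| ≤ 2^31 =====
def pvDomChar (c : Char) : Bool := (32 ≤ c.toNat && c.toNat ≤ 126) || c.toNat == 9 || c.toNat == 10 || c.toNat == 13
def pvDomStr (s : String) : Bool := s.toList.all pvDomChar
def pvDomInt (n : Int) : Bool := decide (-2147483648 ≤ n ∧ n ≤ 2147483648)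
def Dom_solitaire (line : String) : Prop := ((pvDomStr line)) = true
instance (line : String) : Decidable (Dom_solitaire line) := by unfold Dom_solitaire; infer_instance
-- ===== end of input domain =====

-- B replaces A's plain recursive game search by the same search memoized on the board
-- string (DP over reachable states, no recomputation); return values are equal.

-- ===== PORT A =====
-- A's counting loop `for char in line: if char == 'o': final_count += 1`
def pvFc (l : List Char) : Int :=
  l.foldl (fun acc c => if c = 'o' then acc + 1 else acc) 0

-- A's recursion, on the board as List Char; the Nat argument is FUEL, a totality
-- device only: it starts at (count of 'o') + 1 and every recursive call removes one
-- pebble, so the 0 branch is never reached.  All list indexing below is guarded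
-- in range (exact for Python's line[i]); slices line[:i], line[i+3:] with i ≥ 0 are
-- List.take/List.drop, exact on nonnegative in-range bounds.
def solAgo : Nat → List Char → Int
  | 0, l => pvFc l
  | f + 1, l =>
      let n := l.length
      (List.range n).foldl (fun fc i =>
        let fc :=
          if i + 2 < n ∧ l.getD i ' ' = 'o' ∧ l.getD (i+1) ' ' = 'o' ∧ l.getD (i+2) ' ' = '-' then
            let rv := solAgo f (l.take i ++ ['-', '-', 'o'] ++ l.drop (i+3))
            if rv < fc then rv else fc
          else fc
        if 1 < i ∧ l.getD i ' ' = 'o' ∧ l.getD (i-1) ' ' = 'o' ∧ l.getD (i-2) ' ' = '-' then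
          let rv := solAgo f (l.take (i-2) ++ ['o', '-', '-'] ++ l.drop (i+1))
          if rv < fc then rv else fc
        else fc) (pvFc l)

def solitaire (line : String) : Int :=
  solAgo (line.toList.count 'o' + 1) line.toList

-- ===== PORT B =====
-- B's memoized search `best`, threading the memo dict (keys are boards) through the
-- loop; the Nat argument is FUEL, a totality device only (starts at pebbles + 1,
-- each recursive call removes one pebble).  s[i:i+3] is (s.drop i).take 3;
-- s.count('o') is List.count.
def solBgo : Nat → List Char → PySem.Dict (List Char) Int → Int × PySem.Dict (List Char) Int
  | 0, s, memo => ((s.count 'o' : Int), memo)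
  | f + 1, s, memo =>
      match memo.get? s with
      | some v => (v, memo)
      | none =>
          let p := (List.range (s.length - 2)).foldl
            (fun (p : Int × PySem.Dict (List Char) Int) i =>
              let w := (s.drop i).take 3
              if w = ['o', 'o', '-'] then
                let q := solBgo f (s.take i ++ ['-', '-', 'o'] ++ s.drop (i+3)) p.2
                (min p.1 q.1, q.2)
              else if w = ['-', 'o', 'o'] then
                let q := solBgo f (s.take i ++ ['o', '-', '-'] ++ s.drop (i+3)) p.2
                (min p.1 q.1, q.2)
              else p) ((s.count 'o' : Int), memo)
          (p.1, p.2.insert s p.1)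

def solitaire_alt (line : String) : Int :=
  (solBgo (line.toList.count 'o' + 1) line.toList PySem.Dict.empty).1

-- ===== PRECONDITION & SPEC =====
def Spec_solitaire (line : String) (out : Int) : Prop := out = solitaire_alt line
instance (line : String) (out : Int) : Decidable (Spec_solitaire line out) := by unfold Spec_solitaire; infer_instance

-- ===== CLAIM (what is proved, stated in full; the proofs are below) =====
def Claim_equal_solitaire : Prop := ∀ (line : String), Dom_solitaire line → Spec_solitaire line (solitaire line)

-- ===== LEMMAS AND PROOFS =====

-- The canonical value: A's recursion at its own starting fuel.
def sol (l : List Char) : Int := solAgo (l.count 'o' + 1) l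

-- one right-jump / left-jump board at window position i
def altR (l : List Char) (i : Nat) : List Char := l.take i ++ ['-', '-', 'o'] ++ l.drop (i+3)
def altL (l : List Char) (i : Nat) : List Char := l.take i ++ ['o', '-', '-'] ++ l.drop (i+3)

-- the (0- or 1-element) move lists at window position i
def movesR (l : List Char) (i : Nat) : List (List Char) :=
  if i + 2 < l.length ∧ l.getD i ' ' = 'o' ∧ l.getD (i+1) ' ' = 'o' ∧ l.getD (i+2) ' ' = '-'
  then [altR l i] else []
def movesL (l : List Char) (i : Nat) : List (List Char) :=
  if i + 2 < l.length ∧ l.getD i ' ' = '-' ∧ l.getD (i+1) ' ' = 'o' ∧ l.getD (i+2) ' ' = 'o'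
  then [altL l i] else []
-- A's left-jump branch, indexed as A indexes it (by the right end of the window)
def movesLA (l : List Char) (i : Nat) : List (List Char) :=
  if 1 < i ∧ l.getD i ' ' = 'o' ∧ l.getD (i-1) ' ' = 'o' ∧ l.getD (i-2) ' ' = '-'
  then [l.take (i-2) ++ ['o', '-', '-'] ++ l.drop (i+1)] else []

def movesA (l : List Char) : List (List Char) :=
  (List.range l.length).flatMap (fun i => movesR l i ++ movesLA l i)
def movesB (l : List Char) : List (List Char) :=
  (List.range (l.length - 2)).flatMap (fun i => movesR l i ++ movesL l i)

def F (fc : Int) (m : List Char) : Int := min fc (sol m)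

-- the loop body of A's for-loop, abstracted over the recursive call r
def AStep (r : List Char → Int) (l : List Char) (n : Nat) (fc : Int) (i : Nat) : Int :=
  let fc :=
    if i + 2 < n ∧ l.getD i ' ' = 'o' ∧ l.getD (i+1) ' ' = 'o' ∧ l.getD (i+2) ' ' = '-' then
      let rv := r (l.take i ++ ['-', '-', 'o'] ++ l.drop (i+3))
      if rv < fc then rv else fc
    else fc
  if 1 < i ∧ l.getD i ' ' = 'o' ∧ l.getD (i-1) ' ' = 'o' ∧ l.getD (i-2) ' ' = '-' then
    let rv := r (l.take (i-2) ++ ['o', '-', '-'] ++ l.drop (i+1))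
    if rv < fc then rv else fc
  else fc

lemma solAgo_succ (f : Nat) (l : List Char) :
    solAgo (f+1) l = (List.range l.length).foldl (AStep (solAgo f) l l.length) (pvFc l) := rfl

lemma pvFc_eq (l : List Char) : pvFc l = ((l.count 'o' : Nat) : Int) := by
  have h := PySem.List.foldl_count_if (fun c => c == 'o') l 0
  simp only [beq_iff_eq] at h
  rw [pvFc, h, List.count]
  simp

lemma if_lt_eq_min (a b : Int) : (if a < b then a else b) = min b a := by
  split_ifs with h <;> omega

lemma getD_eq_getElem' (l : List Char) (i : Nat) (h : i < l.length) : l.getD i ' ' = l[i] := by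
  simp [List.getD_eq_getElem?_getD, List.getElem?_eq_getElem h]

lemma take3_drop (l : List Char) (i : Nat) (h : i + 2 < l.length) :
    (l.drop i).take 3 = [l[i], l[i+1], l[i+2]] := by
  rw [List.drop_eq_getElem_cons (by omega : i < l.length),
      List.drop_eq_getElem_cons (i := i+1) (by omega),
      List.drop_eq_getElem_cons (i := i+2) (by omega)]
  rfl

lemma window_eq_iff (l : List Char) (i : Nat) (a b c : Char) :
    (l.drop i).take 3 = [a, b, c] ↔
      i + 2 < l.length ∧ l.getD i ' ' = a ∧ l.getD (i+1) ' ' = b ∧ l.getD (i+2) ' ' = c := by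
  constructor
  · intro hw
    have hlen : ((l.drop i).take 3).length = 3 := by rw [hw]; rfl
    have hl : i + 2 < l.length := by
      simp [List.length_take, List.length_drop] at hlen; omega
    rw [take3_drop l i hl] at hw
    injection hw with h1 hw; injection hw with h2 hw; injection hw with h3 _
    exact ⟨hl, by rw [getD_eq_getElem' _ _ (by omega)]; exact h1,
      by rw [getD_eq_getElem' _ _ (by omega)]; exact h2,
      by rw [getD_eq_getElem' _ _ (by omega)]; exact h3⟩
  · rintro ⟨hl, h1, h2, h3⟩
    rw [take3_drop l i hl, ← getD_eq_getElem' _ _ (by omega), ← getD_eq_getElem' _ _ (by omega),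
      ← getD_eq_getElem' _ _ (by omega), h1, h2, h3]

lemma window_split (l : List Char) (i : Nat) (h : i + 2 < l.length) :
    l = l.take i ++ l[i] :: l[i+1] :: l[i+2] :: l.drop (i+3) := by
  conv_lhs => rw [← List.take_append_drop i l]
  rw [List.drop_eq_getElem_cons (by omega : i < l.length),
      List.drop_eq_getElem_cons (i := i+1) (by omega),
      List.drop_eq_getElem_cons (i := i+2) (by omega)]

lemma count_altR (l : List Char) (i : Nat) (h : i + 2 < l.length)
    (h0 : l.getD i ' ' = 'o') (h1 : l.getD (i+1) ' ' = 'o') (h2 : l.getD (i+2) ' ' = '-') :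
    (altR l i).count 'o' + 1 = l.count 'o' := by
  rw [getD_eq_getElem' _ _ (by omega)] at h0 h1 h2
  conv_rhs => rw [window_split l i h, h0, h1, h2]
  simp [altR, List.count_append]; omega

lemma count_altL (l : List Char) (i : Nat) (h : i + 2 < l.length)
    (h0 : l.getD i ' ' = '-') (h1 : l.getD (i+1) ' ' = 'o') (h2 : l.getD (i+2) ' ' = 'o') :
    (altL l i).count 'o' + 1 = l.count 'o' := by
  rw [getD_eq_getElem' _ _ (by omega)] at h0 h1 h2
  conv_rhs => rw [window_split l i h, h0, h1, h2]
  simp [altL, List.count_append]; omega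

-- the step function only calls r on boards with one pebble fewer
lemma AStep_congr (r r' : List Char → Int) (l : List Char)
    (h : ∀ m, m.count 'o' + 1 = l.count 'o' → r m = r' m) :
    AStep r l l.length = AStep r' l l.length := by
  funext fc i
  unfold AStep
  by_cases hR : i + 2 < l.length ∧ l.getD i ' ' = 'o' ∧ l.getD (i+1) ' ' = 'o' ∧ l.getD (i+2) ' ' = '-'
  case pos =>
    have e1 : r (l.take i ++ ['-', '-', 'o'] ++ l.drop (i+3)) =
        r' (l.take i ++ ['-', '-', 'o'] ++ l.drop (i+3)) :=
      h _ (count_altR l i hR.1 hR.2.1 hR.2.2.1 hR.2.2.2)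
    by_cases hL : 1 < i ∧ l.getD i ' ' = 'o' ∧ l.getD (i-1) ' ' = 'o' ∧ l.getD (i-2) ' ' = '-'
    case pos =>
      have hL' : (i-2) + 2 < l.length ∧ l.getD (i-2) ' ' = '-' ∧ l.getD (i-2+1) ' ' = 'o' ∧ l.getD (i-2+2) ' ' = 'o' := by
        obtain ⟨hi, e0, ea, eb⟩ := hL
        exact ⟨by omega, eb, by rw [(by omega : i - 2 + 1 = i - 1)]; exact ea,
          by rw [(by omega : i - 2 + 2 = i)]; exact e0⟩
      have e2 : r (l.take (i-2) ++ ['o', '-', '-'] ++ l.drop (i+1)) =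
          r' (l.take (i-2) ++ ['o', '-', '-'] ++ l.drop (i+1)) := by
        have := count_altL l (i-2) hL'.1 hL'.2.1 hL'.2.2.1 hL'.2.2.2
        exact h _ (by simpa [altL, (by omega : i - 2 + 3 = i + 1)] using this)
      simp only [if_pos hR, if_pos hL, e1, e2]
    case neg => simp only [if_pos hR, if_neg hL, e1]
  case neg =>
    by_cases hL : 1 < i ∧ l.getD i ' ' = 'o' ∧ l.getD (i-1) ' ' = 'o' ∧ l.getD (i-2) ' ' = '-'
    case pos =>
      have hL' : (i-2) + 2 < l.length ∧ l.getD (i-2) ' ' = '-' ∧ l.getD (i-2+1) ' ' = 'o' ∧ l.getD (i-2+2) ' ' = 'o' := by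
        obtain ⟨hi, e0, ea, eb⟩ := hL
        have hin : i < l.length := by
          by_contra hn
          rw [List.getD_eq_default _ _ (by omega)] at e0
          exact absurd e0 (by decide)
        exact ⟨by omega, eb, by rw [(by omega : i - 2 + 1 = i - 1)]; exact ea,
          by rw [(by omega : i - 2 + 2 = i)]; exact e0⟩
      have e2 : r (l.take (i-2) ++ ['o', '-', '-'] ++ l.drop (i+1)) =
          r' (l.take (i-2) ++ ['o', '-', '-'] ++ l.drop (i+1)) := by
        have := count_altL l (i-2) hL'.1 hL'.2.1 hL'.2.2.1 hL'.2.2.2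
        exact h _ (by simpa [altL, (by omega : i - 2 + 3 = i + 1)] using this)
      simp only [if_neg hR, if_pos hL, e2]
    case neg => simp only [if_neg hR, if_neg hL]

-- fuel irrelevance for A's recursion
lemma solAgo_stable : ∀ f l, l.count 'o' < f → solAgo f l = sol l := by
  intro f
  induction f using Nat.strong_induction_on with
  | _ f IH =>
    intro l hf
    match f, hf with
    | f + 1, hf =>
      have key : ∀ g, l.count 'o' ≤ g → g < f + 1 →
          AStep (solAgo g) l l.length = AStep sol l l.length := by
        intro g hg hgf
        exact AStep_congr _ _ _ (fun m hm => IH g hgf m (by omega))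
      have h1 : solAgo (f+1) l = (List.range l.length).foldl (AStep sol l l.length) (pvFc l) := by
        rw [solAgo_succ, key f (by omega) (by omega)]
      have h2 : sol l = (List.range l.length).foldl (AStep sol l l.length) (pvFc l) := by
        rw [sol, solAgo_succ]
        by_cases hc : l.count 'o' < f
        · rw [key (l.count 'o') (by omega) (by omega)]
        · have hce : l.count 'o' = f := by omega
          rw [hce, key f (by omega) (by omega)]
      rw [h1, h2]

lemma foldl_flatMap_F (is : List Nat) (h : Nat → List (List Char)) (fc : Int) :
    (is.flatMap h).foldl F fc = is.foldl (fun b i => (h i).foldl F b) fc := by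
  rw [List.flatMap_def, List.foldl_flatten, List.foldl_map]

-- A's value as a min-fold of sol over its move list
lemma sol_eq_foldA (l : List Char) : sol l = (movesA l).foldl F ((l.count 'o' : Nat) : Int) := by
  have hstep : AStep sol l l.length = fun fc i => (movesR l i ++ movesLA l i).foldl F fc := by
    funext fc i
    rw [List.foldl_append]
    unfold AStep movesR movesLA
    by_cases hR : i + 2 < l.length ∧ l.getD i ' ' = 'o' ∧ l.getD (i+1) ' ' = 'o' ∧ l.getD (i+2) ' ' = '-' <;>
      by_cases hL : 1 < i ∧ l.getD i ' ' = 'o' ∧ l.getD (i-1) ' ' = 'o' ∧ l.getD (i-2) ' ' = '-'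
    · simp only [if_pos hR, if_pos hL, List.foldl_cons, List.foldl_nil, F, altR, if_lt_eq_min]
    · simp only [if_pos hR, if_neg hL, List.foldl_cons, List.foldl_nil, F, altR, if_lt_eq_min]
    · simp only [if_neg hR, if_pos hL, List.foldl_cons, List.foldl_nil, F, altR, if_lt_eq_min]
    · simp only [if_neg hR, if_neg hL, List.foldl_nil]
  have h2 : sol l = (List.range l.length).foldl (AStep sol l l.length) (pvFc l) := by
    conv_lhs => rw [sol, solAgo_succ]
    rw [AStep_congr (solAgo (l.count 'o')) sol l (fun m hm => solAgo_stable _ m (by omega))]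
  rw [h2, pvFc_eq, movesA, foldl_flatMap_F, hstep]

lemma flatMap_append_perm (is : List Nat) (p q : Nat → List (List Char)) :
    (is.flatMap fun i => p i ++ q i).Perm (is.flatMap p ++ is.flatMap q) := by
  induction is with
  | nil => simp
  | cons a is ih =>
    simp only [List.flatMap_cons]
    refine (ih.append_left (p a ++ q a)).trans ?_
    rw [List.append_assoc (p a), List.append_assoc (p a)]
    exact (List.perm_append_comm_assoc _ _ _).append_left _

lemma flatMap_range_truncate (h : Nat → List (List Char)) :
    ∀ (n k : Nat), k ≤ n → (∀ i, k ≤ i → h i = []) →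
    (List.range n).flatMap h = (List.range k).flatMap h := by
  intro n
  induction n with
  | zero => intro k hk _; rw [Nat.le_zero.1 hk]
  | succ n ih =>
    intro k hk h0
    by_cases hkn : k = n + 1
    · rw [hkn]
    · rw [List.range_succ, List.flatMap_append, ih k (by omega) h0]
      simp [h0 n (by omega)]

lemma movesR_nil (l : List Char) (i : Nat) (h : l.length - 2 ≤ i) : movesR l i = [] := by
  rw [movesR, if_neg]; rintro ⟨h1, -⟩; omega

lemma movesLA_shift (l : List Char) (j : Nat) : movesLA l (2+j) = movesL l j := by
  rw [movesLA, movesL]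
  have e1 : 2 + j - 1 = j + 1 := by omega
  have e2 : 2 + j - 2 = j := by omega
  have e3 : 2 + j = j + 2 := by omega
  by_cases hB : j + 2 < l.length ∧ l.getD j ' ' = '-' ∧ l.getD (j+1) ' ' = 'o' ∧ l.getD (j+2) ' ' = 'o'
  · rw [if_pos (by rw [e1, e2, e3]; exact ⟨by omega, hB.2.2.2, hB.2.2.1, hB.2.1⟩), if_pos hB]
    rw [e2, (by omega : 2 + j + 1 = j + 3)]; rfl
  · rw [if_neg ?_, if_neg hB]
    rintro ⟨-, c0, c1, c2⟩
    rw [e1] at c1; rw [e2] at c2; rw [e3] at c0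
    have hlen : j + 2 < l.length := by
      by_contra hn
      rw [List.getD_eq_default _ _ (by omega)] at c0
      exact absurd c0 (by decide)
    exact hB ⟨hlen, c2, c1, c0⟩

lemma movesA_perm_movesB (l : List Char) : (movesA l).Perm (movesB l) := by
  rw [movesA, movesB]
  refine (flatMap_append_perm _ _ _).trans (.trans ?_ (flatMap_append_perm _ _ _).symm)
  have hR : (List.range l.length).flatMap (movesR l) =
      (List.range (l.length - 2)).flatMap (movesR l) :=
    flatMap_range_truncate _ _ _ (by omega) (fun i hi => movesR_nil l i hi)
  have hL : (List.range l.length).flatMap (movesLA l) =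
      (List.range (l.length - 2)).flatMap (movesL l) := by
    by_cases h2 : 2 ≤ l.length
    · conv_lhs => rw [(by omega : l.length = 2 + (l.length - 2)), List.range_add]
      rw [List.flatMap_append, List.flatMap_map]
      have : (List.range 2).flatMap (movesLA l) = [] := by
        have h0 : movesLA l 0 = [] := by rw [movesLA, if_neg]; rintro ⟨h, -⟩; omega
        have h1 : movesLA l 1 = [] := by rw [movesLA, if_neg]; rintro ⟨h, -⟩; omega
        simp [List.range_succ, h0, h1]
      rw [this, List.nil_append]
      simp only [movesLA_shift]
    · have hn : l.length - 2 = 0 := by omega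
      rw [hn]
      have h0 : movesLA l 0 = [] := by rw [movesLA, if_neg]; rintro ⟨h, -⟩; omega
      interval_cases h : l.length <;> simp [List.range_succ, h0]
  rw [hR, hL]

lemma sol_eq_foldB (l : List Char) : sol l = (movesB l).foldl F ((l.count 'o' : Nat) : Int) := by
  rw [sol_eq_foldA]
  haveI : RightCommutative F := ⟨fun b a1 a2 => by simp only [F, min_assoc, min_comm (sol a1)]⟩
  exact (movesA_perm_movesB l).foldl_eq _

def MemoInv (m : PySem.Dict (List Char) Int) : Prop := ∀ k v, m.get? k = some v → v = sol k

-- the loop body of B's for-loop, abstracted over the recursive call r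
def BStep (r : List Char → PySem.Dict (List Char) Int → Int × PySem.Dict (List Char) Int)
    (s : List Char) (p : Int × PySem.Dict (List Char) Int) (i : Nat) :
    Int × PySem.Dict (List Char) Int :=
  let w := (s.drop i).take 3
  if w = ['o', 'o', '-'] then
    let q := r (s.take i ++ ['-', '-', 'o'] ++ s.drop (i+3)) p.2
    (min p.1 q.1, q.2)
  else if w = ['-', 'o', 'o'] then
    let q := r (s.take i ++ ['o', '-', '-'] ++ s.drop (i+3)) p.2
    (min p.1 q.1, q.2)
  else p

lemma solBgo_succ (f : Nat) (s : List Char) (memo : PySem.Dict (List Char) Int) :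
    solBgo (f+1) s memo =
      match memo.get? s with
      | some v => (v, memo)
      | none =>
          let p := (List.range (s.length - 2)).foldl (BStep (solBgo f) s) ((s.count 'o' : Int), memo)
          (p.1, p.2.insert s p.1) := rfl

lemma Bloop (r : List Char → PySem.Dict (List Char) Int → Int × PySem.Dict (List Char) Int)
    (s : List Char)
    (HB : ∀ t m', MemoInv m' → t.count 'o' + 1 = s.count 'o' →
      (r t m').1 = sol t ∧ MemoInv (r t m').2) :
    ∀ (is : List Nat) (acc : Int) (memo : PySem.Dict (List Char) Int), MemoInv memo →
      (is.foldl (BStep r s) (acc, memo)).1 =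
        (is.flatMap (fun j => movesR s j ++ movesL s j)).foldl F acc
      ∧ MemoInv (is.foldl (BStep r s) (acc, memo)).2 := by
  intro is
  induction is with
  | nil => intro acc memo hm; exact ⟨rfl, hm⟩
  | cons j is ih =>
    intro acc memo hm
    simp only [List.foldl_cons, List.flatMap_cons, List.foldl_append]
    by_cases hw1 : (s.drop j).take 3 = ['o', 'o', '-']
    · obtain ⟨hlen, h0, h1, h2⟩ := (window_eq_iff s j 'o' 'o' '-').1 hw1
      have hmR : movesR s j = [altR s j] := if_pos ⟨hlen, h0, h1, h2⟩
      have hmL : movesL s j = [] := by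
        rw [movesL, if_neg]; rintro ⟨-, hc, -⟩; rw [h0] at hc; exact absurd hc (by decide)
      have hcall := HB (altR s j) memo hm (count_altR s j hlen h0 h1 h2)
      have hstep : BStep r s (acc, memo) j =
          (min acc (r (altR s j) memo).1, (r (altR s j) memo).2) := by
        rw [BStep]; rw [if_pos hw1]; rfl
      rw [hstep, hmR, hmL]
      have := ih (min acc (r (altR s j) memo).1) (r (altR s j) memo).2 hcall.2
      refine ⟨?_, this.2⟩
      rw [this.1, List.foldl_nil, List.foldl_cons, List.foldl_nil]
      congr 1
      rw [hcall.1]; rfl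
    · by_cases hw2 : (s.drop j).take 3 = ['-', 'o', 'o']
      · obtain ⟨hlen, h0, h1, h2⟩ := (window_eq_iff s j '-' 'o' 'o').1 hw2
        have hmR : movesR s j = [] := by
          rw [movesR, if_neg]; rintro ⟨-, hc, -⟩; rw [h0] at hc; exact absurd hc (by decide)
        have hmL : movesL s j = [altL s j] := if_pos ⟨hlen, h0, h1, h2⟩
        have hcall := HB (altL s j) memo hm (count_altL s j hlen h0 h1 h2)
        have hstep : BStep r s (acc, memo) j =
            (min acc (r (altL s j) memo).1, (r (altL s j) memo).2) := by
          rw [BStep]; rw [if_neg hw1, if_pos hw2]; rfl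
        rw [hstep, hmR, hmL]
        have := ih (min acc (r (altL s j) memo).1) (r (altL s j) memo).2 hcall.2
        refine ⟨?_, this.2⟩
        rw [this.1, List.foldl_nil, List.foldl_cons, List.foldl_nil]
        congr 1
        rw [hcall.1]; rfl
      · have hmR : movesR s j = [] := by
          rw [movesR, if_neg]
          rintro ⟨hlen, h0, h1, h2⟩
          exact hw1 ((window_eq_iff s j 'o' 'o' '-').2 ⟨hlen, h0, h1, h2⟩)
        have hmL : movesL s j = [] := by
          rw [movesL, if_neg]
          rintro ⟨hlen, h0, h1, h2⟩
          exact hw2 ((window_eq_iff s j '-' 'o' 'o').2 ⟨hlen, h0, h1, h2⟩)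
        have hstep : BStep r s (acc, memo) j = (acc, memo) := by
          rw [BStep]; rw [if_neg hw1, if_neg hw2]
        rw [hstep, hmR, hmL, List.foldl_nil, List.foldl_nil]
        exact ih acc memo hm

lemma solBgo_main : ∀ (f : Nat) (s : List Char) (memo : PySem.Dict (List Char) Int),
    s.count 'o' < f → MemoInv memo →
    (solBgo f s memo).1 = sol s ∧ MemoInv (solBgo f s memo).2 := by
  intro f
  induction f using Nat.strong_induction_on with
  | _ f IH =>
    intro s memo hf hm
    match f, hf with
    | f + 1, hf =>
      rw [solBgo_succ]
      cases hget : memo.get? s with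
      | some v => exact ⟨(hm s v hget).symm ▸ rfl, hm⟩
      | none =>
        have HB : ∀ t m', MemoInv m' → t.count 'o' + 1 = s.count 'o' →
            (solBgo f t m').1 = sol t ∧ MemoInv (solBgo f t m').2 := by
          intro t m' hm' hc
          exact IH f (Nat.lt_succ_self f) t m' (by omega) hm'
        have hloop := Bloop (solBgo f) s HB (List.range (s.length - 2))
          ((s.count 'o' : Int)) memo hm
        have hp1 : ((List.range (s.length - 2)).foldl (BStep (solBgo f) s)
            ((s.count 'o' : Int), memo)).1 = sol s := by
          rw [hloop.1, ← movesB, ← sol_eq_foldB]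
        refine ⟨hp1, ?_⟩
        intro k v hkv
        rw [PySem.Dict.get?_insert] at hkv
        by_cases hks : k = s
        · rw [if_pos hks] at hkv
          cases hkv; rw [hp1, hks]
        · rw [if_neg hks] at hkv
          exact hloop.2 k v hkv

-- ===== VERDICT (by name: the statement is the Claim_ definition above) =====
theorem solitaire_spec : Claim_equal_solitaire := by
  intro line _
  show solitaire line = solitaire_alt line
  have h := solBgo_main (line.toList.count 'o' + 1) line.toList PySem.Dict.empty
    (Nat.lt_succ_self _) (fun k v hkv => by simp [PySem.Dict.get?_empty] at hkv)
  simpa [solitaire, solitaire_alt, sol] using h.1.symm
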